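-- pv_equiv track=rewrite | github.com/ipeadata-lab/Editorial_IPEA_IA | src/editorial_docx/docx_utils.py | _normalize_text_with_mapping
-- ===== SOURCE A (Python) =====
-- import unicodedata
--
-- def _normalize_text_with_mapping(text: str) -> tuple[str, list[int]]:
--     normalized_chars: list[str] = []
--     mapping: list[int] = []
--
--     for idx, char in enumerate(text or ""):
--         decomposed = unicodedata.normalize("NFD", char)
--         stripped = "".join(ch for ch in decomposed if unicodedata.category(ch) != "Mn")
--         if not stripped:
--             continue
--
--         lowered = stripped.lower()
--         if lowered.isspace():
--             normalized_chars.append(" ")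
--             mapping.append(idx)
--             continue
--
--         for part in lowered:
--             normalized_chars.append(part)
--             mapping.append(idx)
--
--     collapsed_chars: list[str] = []
--     collapsed_mapping: list[int] = []
--     prev_space = False
--     for char, idx in zip(normalized_chars, mapping):
--         is_space = char.isspace()
--         if is_space and prev_space:
--             continue
--         collapsed_chars.append(" " if is_space else char)
--         collapsed_mapping.append(idx)
--         prev_space = is_space
--
--     return "".join(collapsed_chars), collapsed_mapping
-- ===== SOURCE B (Python) =====
-- import unicodedata
--
--
-- def _normalize_text_with_mapping(text: str) -> tuple[str, list[int]]:
--     # Single pass: collapse whitespace inline while emitting, instead of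
--     # building an intermediate list and collapsing in a second pass.
--     chars: list[str] = []
--     mapping: list[int] = []
--     prev_space = False
--     for idx, char in enumerate(text or ""):
--         decomposed = unicodedata.normalize("NFD", char)
--         stripped = "".join(c for c in decomposed if unicodedata.category(c) != "Mn")
--         if not stripped:
--             continue
--         lowered = stripped.lower()
--         if lowered.isspace():
--             if not prev_space:
--                 chars.append(" ")
--                 mapping.append(idx)
--             prev_space = True
--         else:
--             for part in lowered:
--                 if part.isspace():
--                     if not prev_space:
--                         chars.append(" ")
--                         mapping.append(idx)
--                     prev_space = True
--                 else:
--                     chars.append(part)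
--                     mapping.append(idx)
--                     prev_space = False
--     return "".join(chars), mapping
-- ===== Notes on version B (the rewrite author's own statement) =====
-- stated objective: simpler
-- what changed: Replaces A's two-pass scheme (build a normalized char/index list, then a second collapse pass) with a single loop that collapses whitespace inline while emitting, threading a prev_space flag across emitted characters.
import Mathlib
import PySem

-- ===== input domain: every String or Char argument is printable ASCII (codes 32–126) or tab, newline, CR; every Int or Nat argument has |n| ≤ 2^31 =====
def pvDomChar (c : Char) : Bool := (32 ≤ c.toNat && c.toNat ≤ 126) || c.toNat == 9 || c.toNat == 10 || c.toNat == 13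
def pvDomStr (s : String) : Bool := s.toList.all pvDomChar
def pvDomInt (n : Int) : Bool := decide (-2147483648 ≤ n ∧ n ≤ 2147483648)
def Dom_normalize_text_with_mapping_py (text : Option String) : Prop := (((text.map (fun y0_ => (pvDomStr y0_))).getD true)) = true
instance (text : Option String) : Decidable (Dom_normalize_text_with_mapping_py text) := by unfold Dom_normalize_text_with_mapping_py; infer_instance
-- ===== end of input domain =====

-- B collapses whitespace inline in a single loop instead of A's two passes; equal return values on the domain.

-- ===== PORT A =====
-- Exact on the stated ASCII domain: unicodedata.normalize("NFD", ch) is the identity there,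
-- no ASCII character has category "Mn" (so `stripped` is the character itself), and
-- `.lower()` of one ASCII character is the single character PySem.Chars.lowerChar ch.

-- first pass of A: build the (normalized char, source index) list
def normAstep1 (acc : List (Char × Int)) (p : Int × Char) : List (Char × Int) :=
  let lowered := PySem.Chars.lowerChar p.2
  if PySem.Chars.isspace lowered then acc ++ [(' ', p.1)]
  else
    -- `for part in lowered`: lowered is the single character `lowered` here
    acc ++ [(lowered, p.1)]

-- second pass of A: collapse whitespace runs
def normAstep2 (st : List Char × List Int × Bool) (p : Char × Int) : List Char × List Int × Bool :=
  let is_space := PySem.Chars.isspace p.1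
  if is_space && st.2.2 then st
  else (st.1 ++ [if is_space then ' ' else p.1], st.2.1 ++ [p.2], is_space)

def normalize_text_with_mapping_py (text : Option String) : String × List Int :=
  let s := (text.getD "").toList
  let pairs := (PySem.List.enumerate s).foldl normAstep1 []
  let r := pairs.foldl normAstep2 (([] : List Char), ([] : List Int), false)
  (String.mk r.1, r.2.1)

-- ===== PORT B =====
-- single step of B's one-pass loop; state = (chars, mapping, prev_space)
def normBstep (st : List Char × List Int × Bool) (p : Int × Char) : List Char × List Int × Bool :=
  let lowered := PySem.Chars.lowerChar p.2
  if PySem.Chars.isspace lowered then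
    if st.2.2 then st else (st.1 ++ [' '], st.2.1 ++ [p.1], true)
  else
    -- `for part in lowered`: the single part is `lowered`, and it is not whitespace here
    (st.1 ++ [lowered], st.2.1 ++ [p.1], false)

def normalize_text_with_mapping_py_alt (text : Option String) : String × List Int :=
  let s := (text.getD "").toList
  let r := (PySem.List.enumerate s).foldl normBstep (([] : List Char), ([] : List Int), false)
  (String.mk r.1, r.2.1)

-- ===== PRECONDITION & SPEC =====
def Spec_normalize_text_with_mapping_py (text : Option String) (out : String × List Int) : Prop := out = normalize_text_with_mapping_py_alt text
instance (text : Option String) (out : String × List Int) : Decidable (Spec_normalize_text_with_mapping_py text out) := by unfold Spec_normalize_text_with_mapping_py; infer_instance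

-- ===== CLAIM (what is proved, stated in full; the proofs are below) =====
def Claim_equal_normalize_text_with_mapping_py : Prop := ∀ (text : Option String), Dom_normalize_text_with_mapping_py text → Spec_normalize_text_with_mapping_py text (normalize_text_with_mapping_py text)

-- ===== LEMMAS AND PROOFS =====

-- the per-character value A's first pass appends
def normAemit (p : Int × Char) : Char × Int :=
  let lowered := PySem.Chars.lowerChar p.2
  (if PySem.Chars.isspace lowered then ' ' else lowered, p.1)

theorem normAstep1_eq (acc : List (Char × Int)) (p : Int × Char) :
    normAstep1 acc p = acc ++ [normAemit p] := by
  unfold normAstep1 normAemit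
  by_cases h : PySem.Chars.isspace (PySem.Chars.lowerChar p.2) = true <;> simp [h]

theorem foldl_normAstep1 (l : List (Int × Char)) (acc : List (Char × Int)) :
    l.foldl normAstep1 acc = acc ++ l.map normAemit := by
  induction l generalizing acc with
  | nil => simp
  | cons x xs ih => simp [List.foldl_cons, normAstep1_eq, ih]

theorem step2_emit_eq_Bstep (st : List Char × List Int × Bool) (p : Int × Char) :
    normAstep2 st (normAemit p) = normBstep st p := by
  unfold normAstep2 normAemit normBstep
  by_cases h : PySem.Chars.isspace (PySem.Chars.lowerChar p.2) = true
  · have : PySem.Chars.isspace ' ' = true := by decide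
    by_cases hb : st.2.2 = true <;> simp [h, this, hb]
  · simp [h]

-- ===== VERDICT (by name: the statement is the Claim_ definition above) =====
theorem normalize_text_with_mapping_py_spec : Claim_equal_normalize_text_with_mapping_py := by
  intro text _
  unfold Spec_normalize_text_with_mapping_py normalize_text_with_mapping_py normalize_text_with_mapping_py_alt
  simp only [foldl_normAstep1, List.nil_append, List.foldl_map]
  have : ∀ (l : List (Int × Char)) (st : List Char × List Int × Bool),
      l.foldl (fun st p => normAstep2 st (normAemit p)) st = l.foldl normBstep st := by
    intro l
    induction l with
    | nil => intro st; rfl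
    | cons x xs ih => intro st; simp [List.foldl_cons, step2_emit_eq_Bstep]
  rw [this]
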